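-- pv_equiv track=rewrite | github.com/zowelqqee/JARVIS | input/input_interpreter.py | _ground_entities
-- ===== SOURCE A (Python) =====
-- _APP_ALIASES: dict[str, str] = {
--     "notes app": "Notes",
--     "notes": "Notes",
--     "vs code": "Visual Studio Code",
--     "vscode": "Visual Studio Code",
--     "visual studio code": "Visual Studio Code",
--     "chrome": "Google Chrome",
--     "google chrome": "Google Chrome",
--     "safari": "Safari",
--     "terminal": "Terminal",
--     "finder": "Finder",
--     "telegram": "Telegram",
--     "slack": "Slack",
--     "spotify": "Spotify",
--     "messages": "Messages",
--     "mail": "Mail",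
--     "calendar": "Calendar",
--     "xcode": "Xcode",
-- }
--
-- def _ground_entities(entity_hints: dict[str, str], raw_input: str) -> dict[str, str]:
--     """Strip entity hints whose values are not grounded in the raw input.
--
--     An entity is grounded when:
--     - Its value appears as a case-insensitive substring of the raw input, OR
--     - A known alias of the value appears in the raw input.
--     """
--     if not entity_hints:
--         return {}
--
--     lowered_input = raw_input.lower()
--     grounded: dict[str, str] = {}
--
--     for role, entity in entity_hints.items():
--         entity_lower = entity.lower().strip()
--         if not entity_lower:
--             continue
--
--         # Direct substring match
--         if entity_lower in lowered_input:
--             grounded[role] = entity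
--             continue
--
--         # Alias match: check if any alias of the entity appears in the input
--         for alias, canonical in _APP_ALIASES.items():
--             if canonical.lower() == entity_lower and alias in lowered_input:
--                 grounded[role] = entity
--                 break
--
--     return grounded
-- ===== SOURCE B (Python) =====
-- _APP_ALIASES: dict[str, str] = {
--     "notes app": "Notes",
--     "notes": "Notes",
--     "vs code": "Visual Studio Code",
--     "vscode": "Visual Studio Code",
--     "visual studio code": "Visual Studio Code",
--     "chrome": "Google Chrome",
--     "google chrome": "Google Chrome",
--     "safari": "Safari",
--     "terminal": "Terminal",
--     "finder": "Finder",
--     "telegram": "Telegram",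
--     "slack": "Slack",
--     "spotify": "Spotify",
--     "messages": "Messages",
--     "mail": "Mail",
--     "calendar": "Calendar",
--     "xcode": "Xcode",
-- }
--
--
-- def _ground_entities(entity_hints: dict[str, str], raw_input: str) -> dict[str, str]:
--     """Stage 1: from the input alone, collect the set of lowercased canonical
--     names evidenced by some alias occurring in the input.
--     Stage 2: keep exactly the entities grounded directly or via that set."""
--     lowered_input = raw_input.lower()
--     evidenced = {
--         canonical.lower()
--         for alias, canonical in _APP_ALIASES.items()
--         if alias in lowered_input
--     }
--     return {
--         role: entity
--         for role, entity in entity_hints.items()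
--         if (e := entity.lower().strip()) and (e in lowered_input or e in evidenced)
--     }
-- ===== Notes on version B (the rewrite author's own statement) =====
-- stated objective: alternative
-- what changed: B is input-driven and staged: one pass over the alias table (independent of the entities) builds the set of lowercased canonical names evidenced by the input, then a single dict-comprehension filter over the entities tests direct substring or membership in that set, so the per-entity alias scan of A disappears.
import Mathlib
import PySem

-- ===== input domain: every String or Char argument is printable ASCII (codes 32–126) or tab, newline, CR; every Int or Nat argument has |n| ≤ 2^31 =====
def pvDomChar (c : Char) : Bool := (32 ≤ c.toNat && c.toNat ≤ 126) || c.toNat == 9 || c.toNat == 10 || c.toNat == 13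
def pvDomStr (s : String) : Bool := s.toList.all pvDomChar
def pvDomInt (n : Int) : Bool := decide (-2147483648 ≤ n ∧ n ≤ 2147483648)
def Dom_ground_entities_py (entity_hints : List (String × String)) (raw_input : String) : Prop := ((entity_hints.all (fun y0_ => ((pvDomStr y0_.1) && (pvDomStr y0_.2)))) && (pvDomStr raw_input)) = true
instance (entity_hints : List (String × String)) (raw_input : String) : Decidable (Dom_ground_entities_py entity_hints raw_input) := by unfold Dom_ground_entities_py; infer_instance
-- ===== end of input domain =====

-- B replaces A's per-entity scan over the alias table by a staged, input-driven pass: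
-- the set of canonical names evidenced by the input is computed once, then entities are
-- filtered against it; objective: alternative (staged) decomposition, same results.

-- ===== PORT A =====
-- the module-level _APP_ALIASES dict, iterated via .items() — a literal association list
def appAliases : List (String × String) :=
  [("notes app", "Notes"), ("notes", "Notes"), ("vs code", "Visual Studio Code"),
   ("vscode", "Visual Studio Code"), ("visual studio code", "Visual Studio Code"),
   ("chrome", "Google Chrome"), ("google chrome", "Google Chrome"), ("safari", "Safari"),
   ("terminal", "Terminal"), ("finder", "Finder"), ("telegram", "Telegram"),
   ("slack", "Slack"), ("spotify", "Spotify"), ("messages", "Messages"),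
   ("mail", "Mail"), ("calendar", "Calendar"), ("xcode", "Xcode")]

def ground_entities_py (entity_hints : List (String × String)) (raw_input : String) : List (String × String) :=
  if entity_hints.isEmpty then []
  else
    let lowered_input := PySem.Str.lower raw_input
    (entity_hints.foldl (fun grounded p =>
      let entity_lower := PySem.Str.strip (PySem.Str.lower p.2)
      if entity_lower == "" then grounded
      else if PySem.Str.isIn entity_lower lowered_input then grounded.insert p.1 p.2
      -- inner for-loop with break: the role is added iff some alias pair matches
      else if appAliases.any (fun ac =>
          PySem.Str.lower ac.2 == entity_lower && PySem.Str.isIn ac.1 lowered_input) then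
        grounded.insert p.1 p.2
      else grounded) PySem.Dict.empty).items

-- ===== PORT B =====
def ground_entities_py_alt (entity_hints : List (String × String)) (raw_input : String) : List (String × String) :=
  let lowered_input := PySem.Str.lower raw_input
  -- stage 1: set comprehension over _APP_ALIASES.items() guarded by 'alias in lowered_input'
  let evidenced : PySem.Set String :=
    appAliases.foldl (fun s ac =>
      if PySem.Str.isIn ac.1 lowered_input then PySem.Set.add s (PySem.Str.lower ac.2) else s)
      PySem.Set.empty
  -- stage 2: dict comprehension filtering the entities
  (entity_hints.foldl (fun d p =>
    let e := PySem.Str.strip (PySem.Str.lower p.2)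
    if !(e == "") && (PySem.Str.isIn e lowered_input || PySem.Set.contains evidenced e) then
      d.insert p.1 p.2
    else d) PySem.Dict.empty).items

-- ===== PRECONDITION & SPEC =====
def Spec_ground_entities_py (entity_hints : List (String × String)) (raw_input : String) (out : List (String × String)) : Prop := out = ground_entities_py_alt entity_hints raw_input
instance (entity_hints : List (String × String)) (raw_input : String) (out : List (String × String)) : Decidable (Spec_ground_entities_py entity_hints raw_input out) := by unfold Spec_ground_entities_py; infer_instance

-- ===== CLAIM (what is proved, stated in full; the proofs are below) =====
def Claim_equal_ground_entities_py : Prop := ∀ (entity_hints : List (String × String)) (raw_input : String), Dom_ground_entities_py entity_hints raw_input → Spec_ground_entities_py entity_hints raw_input (ground_entities_py entity_hints raw_input)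

-- ===== LEMMAS AND PROOFS =====

-- membership in the staged 'evidenced' set: exactly the lowered canonicals of alias pairs in the input
theorem evidenced_mem (L : List (String × String)) (lowered e : String) (s : PySem.Set String) :
    e ∈ (L.foldl (fun s ac =>
        if PySem.Str.isIn ac.1 lowered then PySem.Set.add s (PySem.Str.lower ac.2) else s) s)
      ↔ e ∈ s ∨ ∃ ac ∈ L, PySem.Str.lower ac.2 = e ∧ PySem.Str.isIn ac.1 lowered = true := by
  induction L generalizing s with
  | nil => simp
  | cons hd tl ih =>
    simp only [List.foldl_cons, ih]
    by_cases h : PySem.Str.isIn hd.1 lowered = true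
    · simp only [h, if_true, PySem.Set.mem_add, List.mem_cons]
      constructor
      · rintro (⟨hs | he⟩ | ⟨ac, hac, h1, h2⟩)
        · exact Or.inl hs
        · exact Or.inr ⟨hd, Or.inl rfl, he.symm, h⟩
        · exact Or.inr ⟨ac, Or.inr hac, h1, h2⟩
      · rintro (hs | ⟨ac, (rfl | hac), h1, h2⟩)
        · exact Or.inl (Or.inl hs)
        · exact Or.inl (Or.inr h1.symm)
        · exact Or.inr ⟨ac, hac, h1, h2⟩
    · simp only [h, List.mem_cons]
      constructor
      · rintro (hs | ⟨ac, hac, h1, h2⟩)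
        · exact Or.inl hs
        · exact Or.inr ⟨ac, Or.inr hac, h1, h2⟩
      · rintro (hs | ⟨ac, (rfl | hac), h1, h2⟩)
        · exact Or.inl hs
        · exact absurd h2 h
        · exact Or.inr ⟨ac, hac, h1, h2⟩

-- the staged membership test equals A's scan of the alias table
theorem evidenced_eq_any (lowered e : String) :
    PySem.Set.contains
      (appAliases.foldl (fun s ac =>
        if PySem.Str.isIn ac.1 lowered then PySem.Set.add s (PySem.Str.lower ac.2) else s)
        PySem.Set.empty) e
      = appAliases.any (fun ac =>
          PySem.Str.lower ac.2 == e && PySem.Str.isIn ac.1 lowered) := by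
  rw [Bool.eq_iff_iff, PySem.Set.contains_iff, List.any_eq_true, evidenced_mem]
  constructor
  · rintro (hs | ⟨ac, hac, h1, h2⟩)
    · exact absurd hs (List.not_mem_nil)
    · refine ⟨ac, hac, ?_⟩
      rw [Bool.and_eq_true, beq_iff_eq]
      exact ⟨h1, h2⟩
  · rintro ⟨ac, hac, hb⟩
    rw [Bool.and_eq_true, beq_iff_eq] at hb
    exact Or.inr ⟨ac, hac, hb.1, hb.2⟩

theorem ground_entities_py_spec : Claim_equal_ground_entities_py := by
  intro entity_hints raw_input _
  unfold Spec_ground_entities_py ground_entities_py ground_entities_py_alt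
  cases he : entity_hints.isEmpty
  · simp only [Bool.false_eq_true, if_false]
    refine congrArg PySem.Dict.items ?_
    apply PySem.List.foldl_congr_mem
    intro grounded p _
    simp only [evidenced_eq_any]
    cases hA : (PySem.Str.strip (PySem.Str.lower p.2) == "") <;>
      cases hB : PySem.Str.isIn (PySem.Str.strip (PySem.Str.lower p.2)) (PySem.Str.lower raw_input) <;>
      cases hC : appAliases.any (fun ac =>
          PySem.Str.lower ac.2 == PySem.Str.strip (PySem.Str.lower p.2)
            && PySem.Str.isIn ac.1 (PySem.Str.lower raw_input)) <;>
      simp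
  · have : entity_hints = [] := List.isEmpty_iff.mp he
    subst this
    rfl
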